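-- pv_equiv track=rewrite | github.com/EricsonArt/carousel_factory | core/utils.py | _candidate_lengths
-- ===== SOURCE A (Python) =====
-- def _candidate_lengths(s: str):
--     """Generator pozycji do prob ucinania — od pelnej dlugosci do ostatnich N przecinków."""
--     yield len(s)
--     # Spróbuj kolejne pozycje przecinkow od konca
--     positions = [i for i, ch in enumerate(s) if ch == ","]
--     for p in reversed(positions[-50:]):
--         yield p
--     # Spróbuj pozycje zamkniec nawiasow
--     for ch_target in "}]":
--         positions = [i + 1 for i, ch in enumerate(s) if ch == ch_target]
--         for p in reversed(positions[-30:]):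
--             yield p
-- ===== SOURCE B (Python) =====
-- def _candidate_lengths(s: str):
--     """Scan s RIGHT-TO-LEFT once, collecting candidates directly in emission order
--     with counters capping each bucket, and stop early once every bucket is full."""
--     yield len(s)
--     commas, braces, brackets = [], [], []
--     for i, ch in reversed(list(enumerate(s))):
--         if ch == "," and len(commas) < 50:
--             commas.append(i)
--         elif ch == "}" and len(braces) < 30:
--             braces.append(i + 1)
--         elif ch == "]" and len(brackets) < 30:
--             brackets.append(i + 1)
--         if len(commas) == 50 and len(braces) == 30 and len(brackets) == 30:
--             break
--     yield from commas
--     yield from braces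
--     yield from brackets
-- ===== Notes on version B (the rewrite author's own statement) =====
-- stated objective: alternative
-- what changed: A scans the whole string three times forward, slices the last 50/30/30 positions and reverses them; B scans once right-to-left with per-bucket counters, collecting candidates already in emission order and breaking out early once all three buckets are full.
import Mathlib
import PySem

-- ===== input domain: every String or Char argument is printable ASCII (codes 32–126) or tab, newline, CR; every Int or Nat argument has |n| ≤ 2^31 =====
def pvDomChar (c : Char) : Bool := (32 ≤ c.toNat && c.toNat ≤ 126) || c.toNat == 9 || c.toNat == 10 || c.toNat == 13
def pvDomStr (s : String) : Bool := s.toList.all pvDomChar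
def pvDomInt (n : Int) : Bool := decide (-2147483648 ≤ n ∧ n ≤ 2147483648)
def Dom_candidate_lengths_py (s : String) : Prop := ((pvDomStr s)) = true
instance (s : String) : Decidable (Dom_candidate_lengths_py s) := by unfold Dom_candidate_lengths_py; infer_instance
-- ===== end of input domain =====

-- B replaces A's three forward scans + tail-slice + reverse with ONE right-to-left scan
-- collecting candidates directly in emission order, with counters and an early break.
-- ===== PORT A =====
def candidate_lengths_py (s : String) : List Int :=
  let positions := (PySem.List.enumerate s.toList 0).filterMap
    (fun p => if p.2 = ',' then some p.1 else none)
  let posBrace := (PySem.List.enumerate s.toList 0).filterMap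
    (fun p => if p.2 = '}' then some (p.1 + 1) else none)
  let posBracket := (PySem.List.enumerate s.toList 0).filterMap
    (fun p => if p.2 = ']' then some (p.1 + 1) else none)
  PySem.Str.len s ::
    ((PySem.List.slice positions (some (-50)) none).reverse ++
     (PySem.List.slice posBrace (some (-30)) none).reverse ++
     (PySem.List.slice posBracket (some (-30)) none).reverse)

-- ===== PORT B =====
-- the reversed-enumerate loop of Source B, with its per-bucket caps and early break
def clAltLoop : List (Int × Char) → List Int → List Int → List Int → (List Int × List Int × List Int)
  | [], c, b, k => (c, b, k)
  | (i, ch) :: rest, c, b, k =>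
    let st :=
      if ch = ',' ∧ c.length < 50 then (c ++ [i], b, k)
      else if ch = '}' ∧ b.length < 30 then (c, b ++ [i + 1], k)
      else if ch = ']' ∧ k.length < 30 then (c, b, k ++ [i + 1])
      else (c, b, k)
    if st.1.length = 50 ∧ st.2.1.length = 30 ∧ st.2.2.length = 30 then st
    else clAltLoop rest st.1 st.2.1 st.2.2

def candidate_lengths_py_alt (s : String) : List Int :=
  let st := clAltLoop (PySem.List.enumerate s.toList 0).reverse [] [] []
  PySem.Str.len s :: (st.1 ++ st.2.1 ++ st.2.2)

-- ===== PRECONDITION & SPEC =====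
def Spec_candidate_lengths_py (s : String) (out : List Int) : Prop := out = candidate_lengths_py_alt s
instance (s : String) (out : List Int) : Decidable (Spec_candidate_lengths_py s out) := by unfold Spec_candidate_lengths_py; infer_instance

-- ===== CLAIM (what is proved, stated in full; the proofs are below) =====
def Claim_equal_candidate_lengths_py : Prop := ∀ (s : String), Dom_candidate_lengths_py s → Spec_candidate_lengths_py s (candidate_lengths_py s)

-- ===== LEMMAS AND PROOFS =====

-- B's loop on any list, from partially filled buckets: each bucket gains the first
-- matches of its character up to its remaining capacity (the break is sound because
-- a full bucket never changes again).
theorem clAltLoop_spec (l : List (Int × Char)) (c b k : List Int)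
    (hc : c.length ≤ 50) (hb : b.length ≤ 30) (hk : k.length ≤ 30) :
    clAltLoop l c b k =
      (c ++ (l.filterMap (fun p => if p.2 = ',' then some p.1 else none)).take (50 - c.length),
       b ++ (l.filterMap (fun p => if p.2 = '}' then some (p.1 + 1) else none)).take (30 - b.length),
       k ++ (l.filterMap (fun p => if p.2 = ']' then some (p.1 + 1) else none)).take (30 - k.length)) := by
  induction l generalizing c b k with
  | nil => simp [clAltLoop]
  | cons x rest ih =>
    obtain ⟨i, ch⟩ := x
    simp only [clAltLoop, List.filterMap_cons]
    by_cases h1 : ch = ',' ∧ c.length < 50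
    · simp only [if_pos h1]
      have hcomma : (50 - c.length) = (50 - (c ++ [i]).length) + 1 := by
        simp; omega
      by_cases hbrk : (c ++ [i]).length = 50 ∧ b.length = 30 ∧ k.length = 30
      · simp only [if_pos hbrk]
        simp [h1.1, hcomma, hbrk.1, hbrk.2.1, hbrk.2.2]
      · simp only [if_neg hbrk]
        rw [ih _ _ _ (by simp; omega) hb hk]
        simp [h1.1, hcomma]
    · by_cases h2 : ch = '}' ∧ b.length < 30
      · simp only [if_neg h1, if_pos h2]
        have hbr : (30 - b.length) = (30 - (b ++ [i + 1]).length) + 1 := by simp; omega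
        by_cases hbrk : c.length = 50 ∧ (b ++ [i + 1]).length = 30 ∧ k.length = 30
        · simp only [if_pos hbrk]
          simp [h2.1, hbr, hbrk.1, hbrk.2.1, hbrk.2.2]
        · simp only [if_neg hbrk]
          rw [ih _ _ _ hc (by simp; omega) hk]
          simp [h2.1, hbr]
      · by_cases h3 : ch = ']' ∧ k.length < 30
        · simp only [if_neg h1, if_neg h2, if_pos h3]
          have hbr : (30 - k.length) = (30 - (k ++ [i + 1]).length) + 1 := by simp; omega
          by_cases hbrk : c.length = 50 ∧ b.length = 30 ∧ (k ++ [i + 1]).length = 30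
          · simp only [if_pos hbrk]
            simp [h3.1, hbr, hbrk.1, hbrk.2.1, hbrk.2.2]
          · simp only [if_neg hbrk]
            rw [ih _ _ _ hc hb (by simp; omega)]
            simp [h3.1, hbr]
        · -- no bucket updated: either the char matches a full bucket, or it is some other char
          simp only [if_neg h1, if_neg h2, if_neg h3]
          by_cases hbrk : c.length = 50 ∧ b.length = 30 ∧ k.length = 30
          · simp only [if_pos hbrk]
            by_cases e1 : ch = ','
            · simp [e1, hbrk.1, hbrk.2.1, hbrk.2.2]
            · by_cases e2 : ch = '}'
              · simp [e2, hbrk.1, hbrk.2.1, hbrk.2.2]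
              · by_cases e3 : ch = ']' <;>
                  simp [e1, e2, e3, hbrk.1, hbrk.2.1, hbrk.2.2]
          · simp only [if_neg hbrk]
            rw [ih _ _ _ hc hb hk]
            by_cases e1 : ch = ','
            · have hfull : ¬ c.length < 50 := fun h => h1 ⟨e1, h⟩
              have : c.length = 50 := by omega
              simp [e1, this]
            · by_cases e2 : ch = '}'
              · have hfull : ¬ b.length < 30 := fun h => h2 ⟨e2, h⟩
                have : b.length = 30 := by omega
                simp [e2, this]
              · by_cases e3 : ch = ']'
                · have hfull : ¬ k.length < 30 := fun h => h3 ⟨e3, h⟩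
                  have : k.length = 30 := by omega
                  simp [e3, this]
                · simp [e1, e2, e3]

-- A's tail-slice-then-reverse equals take-after-reverse
theorem rev_tail_slice (P : List Int) (n : Nat) (hn : 0 < n) :
    (PySem.List.slice P (some (-(n : Int))) none).reverse = P.reverse.take n := by
  rw [PySem.List.slice_from_neg_natCast P n hn, List.reverse_drop]
  by_cases h : n ≤ P.length
  · rw [Nat.sub_sub_self h]
  · have h1 : P.length - n = 0 := by omega
    rw [h1, Nat.sub_zero, List.take_of_length_le (by simp),
        List.take_of_length_le (by simp; omega)]

theorem candidate_lengths_py_spec : Claim_equal_candidate_lengths_py := by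
  intro s _
  unfold Spec_candidate_lengths_py candidate_lengths_py candidate_lengths_py_alt
  rw [clAltLoop_spec _ _ _ _ (by simp) (by simp) (by simp)]
  simp only [List.filterMap_reverse, List.nil_append, List.length_nil, Nat.sub_zero]
  rw [show ((-50 : Int)) = -((50 : Nat) : Int) by norm_num,
      show ((-30 : Int)) = -((30 : Nat) : Int) by norm_num,
      rev_tail_slice _ 50 (by omega), rev_tail_slice _ 30 (by omega),
      rev_tail_slice _ 30 (by omega)]
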